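-- pv_equiv track=rewrite | github.com/nicolaegues/SCFI_DNN | dnn_models.py | calculate_flat_dim
-- ===== SOURCE A (Python) =====
-- def calculate_flat_dim(im_size, hidden_dim, nr_layers, pool_kernel_size):
--
--     height = im_size[0]
--     width = im_size[1]
--
--     for layer in range(nr_layers):
--         height //= pool_kernel_size[0]
--         width //= pool_kernel_size[1]
--
--     final_hidden_dim = hidden_dim*(2**(nr_layers-1))
--     flat_dim = height * width * final_hidden_dim
--
--     return flat_dim
-- ===== SOURCE B (Python) =====
-- def calculate_flat_dim(im_size, hidden_dim, nr_layers, pool_kernel_size):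
--     # closed form: n repeated floor divisions by k (k >= 1) = one floor division by k**n
--     height = im_size[0] // pool_kernel_size[0] ** nr_layers
--     width = im_size[1] // pool_kernel_size[1] ** nr_layers
--     return height * width * hidden_dim * 2 ** (nr_layers - 1)
-- ===== Notes on version B (the rewrite author's own statement) =====
-- stated objective: simpler
-- what changed: Replaces the per-layer loop of repeated floor divisions with a single closed-form floor division by pool_kernel_size**nr_layers for each dimension.
-- outside the precondition, e.g. on calculate_flat_dim((7, 7), 1, 2, (-2, -2)): A returns 8, B returns 2; on calculate_flat_dim((4, 4), 2, 0, (2, 2)): A returns 16.0, B returns 16.0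
import Mathlib
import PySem

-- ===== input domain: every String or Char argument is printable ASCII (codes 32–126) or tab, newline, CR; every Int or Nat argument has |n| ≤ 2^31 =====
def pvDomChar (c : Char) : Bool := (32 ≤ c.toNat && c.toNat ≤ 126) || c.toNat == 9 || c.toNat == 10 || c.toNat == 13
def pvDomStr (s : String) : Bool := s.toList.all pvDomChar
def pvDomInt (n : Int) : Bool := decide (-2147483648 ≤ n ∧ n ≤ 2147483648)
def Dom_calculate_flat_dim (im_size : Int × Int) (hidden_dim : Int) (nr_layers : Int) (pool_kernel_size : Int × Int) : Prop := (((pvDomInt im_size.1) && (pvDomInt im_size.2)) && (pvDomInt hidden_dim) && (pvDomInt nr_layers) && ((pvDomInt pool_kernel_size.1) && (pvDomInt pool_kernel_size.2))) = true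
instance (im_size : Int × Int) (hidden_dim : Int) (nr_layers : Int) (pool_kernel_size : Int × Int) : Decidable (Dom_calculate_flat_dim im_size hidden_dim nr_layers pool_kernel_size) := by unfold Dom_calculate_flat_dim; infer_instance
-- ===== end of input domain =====

-- B replaces A's per-layer loop of repeated floor divisions by one closed-form floor
-- division by pool_kernel_size ** nr_layers per dimension (objective: simpler).

-- ===== PORT A =====
def calculate_flat_dim (im_size : Int × Int) (hidden_dim : Int) (nr_layers : Int) (pool_kernel_size : Int × Int) : Int :=
  let height := im_size.1
  let width := im_size.2
  let hw := (PySem.List.pyRange 0 nr_layers 1).foldl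
    (fun (p : Int × Int) _ =>
      (PySem.Int.floordiv p.1 pool_kernel_size.1, PySem.Int.floordiv p.2 pool_kernel_size.2))
    (height, width)
  let final_hidden_dim := hidden_dim * 2 ^ (nr_layers - 1).toNat
  hw.1 * hw.2 * final_hidden_dim

-- ===== PORT B =====
def calculate_flat_dim_alt (im_size : Int × Int) (hidden_dim : Int) (nr_layers : Int) (pool_kernel_size : Int × Int) : Int :=
  let height := PySem.Int.floordiv im_size.1 (pool_kernel_size.1 ^ nr_layers.toNat)
  let width := PySem.Int.floordiv im_size.2 (pool_kernel_size.2 ^ nr_layers.toNat)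
  height * width * hidden_dim * 2 ^ (nr_layers - 1).toNat

-- ===== PRECONDITION & SPEC =====
-- Pre_ restricts to the natural domain: nr_layers ≥ 1 (for nr_layers ≤ 0 Python A returns a
-- float, not an int, since 2**(nr_layers-1) is fractional) and positive pooling kernel sizes
-- (a kernel component 0 makes A raise ZeroDivisionError; negative kernel sizes are outside the
-- task's natural domain and the closed form intentionally does not mimic them).
def Pre_calculate_flat_dim (im_size : Int × Int) (hidden_dim : Int) (nr_layers : Int) (pool_kernel_size : Int × Int) : Prop :=
  1 ≤ nr_layers ∧ 1 ≤ pool_kernel_size.1 ∧ 1 ≤ pool_kernel_size.2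
instance (im_size : Int × Int) (hidden_dim : Int) (nr_layers : Int) (pool_kernel_size : Int × Int) : Decidable (Pre_calculate_flat_dim im_size hidden_dim nr_layers pool_kernel_size) := by unfold Pre_calculate_flat_dim; infer_instance

def pvWitness_calculate_flat_dim : (Int × Int) × Int × Int × (Int × Int) := ((28, 28), 16, 2, (2, 2))

def Spec_calculate_flat_dim (im_size : Int × Int) (hidden_dim : Int) (nr_layers : Int) (pool_kernel_size : Int × Int) (out : Int) : Prop := out = calculate_flat_dim_alt im_size hidden_dim nr_layers pool_kernel_size
instance (im_size : Int × Int) (hidden_dim : Int) (nr_layers : Int) (pool_kernel_size : Int × Int) (out : Int) : Decidable (Spec_calculate_flat_dim im_size hidden_dim nr_layers pool_kernel_size out) := by unfold Spec_calculate_flat_dim; infer_instance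

-- ===== CLAIM (what is proved, stated in full; the proofs are below) =====
def Claim_equal_calculate_flat_dim : Prop := ∀ (im_size : Int × Int) (hidden_dim : Int) (nr_layers : Int) (pool_kernel_size : Int × Int), Dom_calculate_flat_dim im_size hidden_dim nr_layers pool_kernel_size → Pre_calculate_flat_dim im_size hidden_dim nr_layers pool_kernel_size → Spec_calculate_flat_dim im_size hidden_dim nr_layers pool_kernel_size (calculate_flat_dim im_size hidden_dim nr_layers pool_kernel_size)

-- ===== LEMMAS AND PROOFS =====

-- the pair-valued fold splits into two independent folds on the components
theorem foldl_pair_split {α : Type} (f g : Int → Int) (l : List α) (a b : Int) :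
    l.foldl (fun (p : Int × Int) _ => (f p.1, g p.2)) (a, b)
      = (l.foldl (fun x _ => f x) a, l.foldl (fun x _ => g x) b) := by
  induction l generalizing a b with
  | nil => rfl
  | cons x xs ih => simp [ih (f a) (g b)]

-- n repeated floor divisions by k ≥ 1 equal one floor division by k ^ n
theorem foldl_floordiv_pow (k : Int) (hk : 1 ≤ k) (l : List Int) (h : Int) :
    l.foldl (fun x _ => PySem.Int.floordiv x k) h = PySem.Int.floordiv h (k ^ l.length) := by
  induction l generalizing h with
  | nil =>
      simp
  | cons x xs ih =>
      have hk0 : (0:Int) < k := by omega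
      have hkp : (0:Int) < k ^ xs.length := pow_pos hk0 _
      have hkp1 : (0:Int) < k ^ (xs.length + 1) := pow_pos hk0 _
      simp only [List.foldl_cons, ih, List.length_cons]
      rw [PySem.Int.floordiv_eq_ediv_of_pos hk0,
          PySem.Int.floordiv_eq_ediv_of_pos hkp,
          PySem.Int.floordiv_eq_ediv_of_pos hkp1,
          Int.ediv_ediv_of_nonneg (le_of_lt hk0)]
      rw [pow_succ']

-- ===== VERDICT (by name: the statement is the Claim_ definition above) =====
theorem calculate_flat_dim_spec : Claim_equal_calculate_flat_dim := by
  intro im hd n k _ hpre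
  obtain ⟨hn, hk1, hk2⟩ := hpre
  unfold Spec_calculate_flat_dim calculate_flat_dim calculate_flat_dim_alt
  simp only []
  rw [foldl_pair_split (fun x => PySem.Int.floordiv x k.1) (fun x => PySem.Int.floordiv x k.2)]
  rw [foldl_floordiv_pow k.1 hk1, foldl_floordiv_pow k.2 hk2]
  have hlen : (PySem.List.pyRange 0 n 1).length = n.toNat := by
    simpa using PySem.List.length_pyRange_one 0 n
  rw [hlen]
  ring
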